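-- pv_equiv track=rewrite | github.com/kitian616/jekyll-TeXt-theme | tools/new-post.py | create_post_header
-- ===== SOURCE A (Python) =====
-- def create_post_header(post_key, license, author, tags, date):
--     # 创建一个字典来保存头部信息
--     header = {
--         'layout': 'article',
--         'title': f'【Topic】Main Title',
--         'permalink': f'/article/:title.html',
--         'key': post_key,
--         'tags': tags.split(","),
--         'author': author,
--         'show_author_profile': 'true',
--         'license': license,
--     }
--
--     # 将字典转换为 YAML 格式的字符串
--     header_yaml = '---\n'
--     for key, value in header.items():
--         if isinstance(value, list):
--             header_yaml += f'{key}:\n'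
--             for item in value:
--                 header_yaml += f'  - {item}\n'
--         else:
--             header_yaml += f'{key}: {value}\n'
--     header_yaml += '---\n\n'
--
--     return header_yaml
-- ===== SOURCE B (Python) =====
-- def create_post_header(post_key, license, author, tags, date):
--     tag_block = "".join(f"  - {t}\n" for t in tags.split(","))
--     return (
--         "---\n"
--         "layout: article\n"
--         "title: \u3010Topic\u3011Main Title\n"
--         "permalink: /article/:title.html\n"
--         f"key: {post_key}\n"
--         f"tags:\n{tag_block}"
--         f"author: {author}\n"
--         "show_author_profile: true\n"
--         f"license: {license}\n"
--         "---\n\n"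
--     )
-- ===== Notes on version B (the rewrite author's own statement) =====
-- stated objective: simpler
-- what changed: Replaced the dict + generic isinstance-dispatch serialization loop with one direct template string in the fixed key order, computing only the tags block with a join over tags.split(",").
import Mathlib
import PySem

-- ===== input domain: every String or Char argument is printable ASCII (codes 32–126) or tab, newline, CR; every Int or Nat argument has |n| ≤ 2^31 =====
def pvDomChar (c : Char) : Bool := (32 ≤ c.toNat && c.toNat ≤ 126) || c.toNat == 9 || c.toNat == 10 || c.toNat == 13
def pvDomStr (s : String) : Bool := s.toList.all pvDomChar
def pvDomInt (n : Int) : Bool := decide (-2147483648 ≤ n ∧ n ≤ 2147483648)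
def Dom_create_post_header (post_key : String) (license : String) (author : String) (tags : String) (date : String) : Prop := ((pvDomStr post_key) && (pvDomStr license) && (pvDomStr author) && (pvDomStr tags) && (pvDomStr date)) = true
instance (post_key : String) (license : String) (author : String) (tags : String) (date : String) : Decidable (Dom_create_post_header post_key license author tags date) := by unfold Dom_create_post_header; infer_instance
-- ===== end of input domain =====

-- B replaces A's dict + isinstance-dispatch loop by one direct template string (same output; objective: simpler).

-- ===== PORT A =====
-- a header value is either a string or a list of strings (mirrors the Python dict's two value types)
inductive PvVal where
  | s : List Char → PvVal
  | l : List (List Char) → PvVal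

-- the dict literal, as its insertion-ordered items list (keys are distinct)
def pvHeaderA (post_key : List Char) (license : List Char) (author : List Char) (tags : List Char) : List (List Char × PvVal) :=
  [ ("layout".toList, .s "article".toList),
    ("title".toList, .s "【Topic】Main Title".toList),
    ("permalink".toList, .s "/article/:title.html".toList),
    ("key".toList, .s post_key),
    ("tags".toList, .l (PySem.Chars.splitOn tags ",".toList)),
    ("author".toList, .s author),
    ("show_author_profile".toList, .s "true".toList),
    ("license".toList, .s license) ]

def create_post_header (post_key : String) (license : String) (author : String) (tags : String) (date : String) : String :=
  let header := pvHeaderA post_key.toList license.toList author.toList tags.toList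
  let header_yaml :=
    header.foldl (fun acc kv =>
      match kv.2 with
      | .l v => (v.foldl (fun a item => a ++ "  - ".toList ++ item ++ ['\n'])
                   (acc ++ kv.1 ++ ":\n".toList))
      | .s v => acc ++ kv.1 ++ ": ".toList ++ v ++ ['\n'])
      "---\n".toList
  String.ofList (header_yaml ++ "---\n\n".toList)

-- ===== PORT B =====
def create_post_header_alt (post_key : String) (license : String) (author : String) (tags : String) (date : String) : String :=
  let tag_block := (PySem.Chars.splitOn tags.toList ",".toList).flatMap
      (fun t => "  - ".toList ++ t ++ ['\n'])
  String.ofList (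
    "---\nlayout: article\ntitle: 【Topic】Main Title\npermalink: /article/:title.html\nkey: ".toList
    ++ post_key.toList ++ "\ntags:\n".toList ++ tag_block
    ++ "author: ".toList ++ author.toList
    ++ "\nshow_author_profile: true\nlicense: ".toList ++ license.toList
    ++ "\n---\n\n".toList)

-- ===== PRECONDITION & SPEC =====
def Spec_create_post_header (post_key : String) (license : String) (author : String) (tags : String) (date : String) (out : String) : Prop := out = create_post_header_alt post_key license author tags date
instance (post_key : String) (license : String) (author : String) (tags : String) (date : String) (out : String) : Decidable (Spec_create_post_header post_key license author tags date out) := by unfold Spec_create_post_header; infer_instance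

-- ===== CLAIM (what is proved, stated in full; the proofs are below) =====
def Claim_equal_create_post_header : Prop := ∀ (post_key : String) (license : String) (author : String) (tags : String) (date : String), Dom_create_post_header post_key license author tags date → Spec_create_post_header post_key license author tags date (create_post_header post_key license author tags date)

-- ===== LEMMAS AND PROOFS =====
theorem pvInner (v : List (List Char)) (acc : List Char) :
    v.foldl (fun a item => a ++ "  - ".toList ++ item ++ ['\n']) acc
      = acc ++ v.flatMap (fun t => "  - ".toList ++ t ++ ['\n']) := by
  have := PySem.List.foldl_append_eq_flatMap (fun t => "  - ".toList ++ t ++ ['\n']) v acc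
  simpa [List.append_assoc] using this

theorem pvLit0 : ("---\n".toList : List Char) = ['-', '-', '-', '\n'] := rfl
theorem pvLit1 : ("layout".toList : List Char) = ['l', 'a', 'y', 'o', 'u', 't'] := rfl
theorem pvLit2 : (": ".toList : List Char) = [':', ' '] := rfl
theorem pvLit3 : ("article".toList : List Char) = ['a', 'r', 't', 'i', 'c', 'l', 'e'] := rfl
theorem pvLit4 : ("title".toList : List Char) = ['t', 'i', 't', 'l', 'e'] := rfl
theorem pvLit5 : ("【Topic】Main Title".toList : List Char) = ['【', 'T', 'o', 'p', 'i', 'c', '】', 'M', 'a', 'i', 'n', ' ', 'T', 'i', 't', 'l', 'e'] := rfl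
theorem pvLit6 : ("permalink".toList : List Char) = ['p', 'e', 'r', 'm', 'a', 'l', 'i', 'n', 'k'] := rfl
theorem pvLit7 : ("/article/:title.html".toList : List Char) = ['/', 'a', 'r', 't', 'i', 'c', 'l', 'e', '/', ':', 't', 'i', 't', 'l', 'e', '.', 'h', 't', 'm', 'l'] := rfl
theorem pvLit8 : ("key".toList : List Char) = ['k', 'e', 'y'] := rfl
theorem pvLit9 : ("tags".toList : List Char) = ['t', 'a', 'g', 's'] := rfl
theorem pvLit10 : (":\n".toList : List Char) = [':', '\n'] := rfl
theorem pvLit11 : ("  - ".toList : List Char) = [' ', ' ', '-', ' '] := rfl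
theorem pvLit12 : ("author".toList : List Char) = ['a', 'u', 't', 'h', 'o', 'r'] := rfl
theorem pvLit13 : ("show_author_profile".toList : List Char) = ['s', 'h', 'o', 'w', '_', 'a', 'u', 't', 'h', 'o', 'r', '_', 'p', 'r', 'o', 'f', 'i', 'l', 'e'] := rfl
theorem pvLit14 : ("true".toList : List Char) = ['t', 'r', 'u', 'e'] := rfl
theorem pvLit15 : ("license".toList : List Char) = ['l', 'i', 'c', 'e', 'n', 's', 'e'] := rfl
theorem pvLit16 : ("---\n\n".toList : List Char) = ['-', '-', '-', '\n', '\n'] := rfl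
theorem pvLit17 : (",".toList : List Char) = [','] := rfl
theorem pvLit18 : ("---\nlayout: article\ntitle: 【Topic】Main Title\npermalink: /article/:title.html\nkey: ".toList : List Char) = ['-', '-', '-', '\n', 'l', 'a', 'y', 'o', 'u', 't', ':', ' ', 'a', 'r', 't', 'i', 'c', 'l', 'e', '\n', 't', 'i', 't', 'l', 'e', ':', ' ', '【', 'T', 'o', 'p', 'i', 'c', '】', 'M', 'a', 'i', 'n', ' ', 'T', 'i', 't', 'l', 'e', '\n', 'p', 'e', 'r', 'm', 'a', 'l', 'i', 'n', 'k', ':', ' ', '/', 'a', 'r', 't', 'i', 'c', 'l', 'e', '/', ':', 't', 'i', 't', 'l', 'e', '.', 'h', 't', 'm', 'l', '\n', 'k', 'e', 'y', ':', ' '] := rfl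
theorem pvLit19 : ("\ntags:\n".toList : List Char) = ['\n', 't', 'a', 'g', 's', ':', '\n'] := rfl
theorem pvLit20 : ("author: ".toList : List Char) = ['a', 'u', 't', 'h', 'o', 'r', ':', ' '] := rfl
theorem pvLit21 : ("\nshow_author_profile: true\nlicense: ".toList : List Char) = ['\n', 's', 'h', 'o', 'w', '_', 'a', 'u', 't', 'h', 'o', 'r', '_', 'p', 'r', 'o', 'f', 'i', 'l', 'e', ':', ' ', 't', 'r', 'u', 'e', '\n', 'l', 'i', 'c', 'e', 'n', 's', 'e', ':', ' '] := rfl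
theorem pvLit22 : ("\n---\n\n".toList : List Char) = ['\n', '-', '-', '-', '\n', '\n'] := rfl

-- ===== VERDICT (by name: the statement is the Claim_ definition above) =====
theorem create_post_header_spec : Claim_equal_create_post_header := by
  intro post_key license author tags date _
  unfold Spec_create_post_header create_post_header create_post_header_alt pvHeaderA
  simp only [List.foldl, pvInner]
  simp [pvLit0, pvLit1, pvLit2, pvLit3, pvLit4, pvLit5, pvLit6, pvLit7, pvLit8, pvLit9, pvLit10, pvLit11, pvLit12, pvLit13, pvLit14, pvLit15, pvLit16, pvLit17, pvLit18, pvLit19, pvLit20, pvLit21, pvLit22, List.append_assoc, List.cons_append]
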